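-- pv_equiv track=rewrite | github.com/SpaceroxDAO/Final_Assignment_Template_v3 | app.py | _extract_text_context
-- ===== SOURCE A (Python) =====
-- from typing import List, Dict, Optional, Any, Tuple
--
-- def _extract_text_context(content: str, search_terms: List[str],
--                          matching_lines: List[str]) -> str:
--     """Extract context around search terms in text."""
--     # For GAIA, we want the most relevant answer
--
--     # Look for lines that contain multiple search terms (more specific matches)
--     term_counts = []
--     for line in matching_lines:
--         count = sum(1 for term in search_terms if term.lower() in line.lower())
--         term_counts.append((count, line))
--
--     # Sort by relevance (number of terms matched)
--     if term_counts:
--         term_counts.sort(key=lambda x: x[0], reverse=True)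
--         # Return the most relevant line
--         return term_counts[0][1]
--
--     # Fallback to paragraph matching
--     paragraphs = content.split('\n\n')
--     relevant_paragraphs = []
--
--     for para in paragraphs:
--         para_lower = para.lower()
--         if any(term.lower() in para_lower for term in search_terms):
--             # Count how many terms match in this paragraph
--             count = sum(1 for term in search_terms if term.lower() in para_lower)
--             relevant_paragraphs.append((count, para.strip()))
--
--     if relevant_paragraphs:
--         # Sort by relevance and return the most relevant paragraph
--         relevant_paragraphs.sort(key=lambda x: x[0], reverse=True)
--         return relevant_paragraphs[0][1]
--
--     return "No relevant content found"
-- ===== SOURCE B (Python) =====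
-- from typing import List
--
-- def _extract_text_context(content: str, search_terms: List[str],
--                           matching_lines: List[str]) -> str:
--     """Single pass: track the first line/paragraph with the strictly greatest term count."""
--     best, best_count = None, -1
--     for line in matching_lines:
--         c = sum(term.lower() in line.lower() for term in search_terms)
--         if c > best_count:
--             best, best_count = line, c
--     if best is not None:
--         return best
--
--     best, best_count = None, 0
--     for para in content.split('\n\n'):
--         pl = para.lower()
--         c = sum(term.lower() in pl for term in search_terms)
--         if c > best_count:
--             best, best_count = para.strip(), c
--     return best if best is not None else "No relevant content found"
-- ===== Notes on version B (the rewrite author's own statement) =====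
-- stated objective: simpler
-- what changed: Replaces build-list-then-stable-reverse-sort (in both the line branch and the paragraph fallback) with a single pass that keeps the first candidate whose term count is strictly greatest, so no intermediate list or sort is needed.
import Mathlib
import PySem

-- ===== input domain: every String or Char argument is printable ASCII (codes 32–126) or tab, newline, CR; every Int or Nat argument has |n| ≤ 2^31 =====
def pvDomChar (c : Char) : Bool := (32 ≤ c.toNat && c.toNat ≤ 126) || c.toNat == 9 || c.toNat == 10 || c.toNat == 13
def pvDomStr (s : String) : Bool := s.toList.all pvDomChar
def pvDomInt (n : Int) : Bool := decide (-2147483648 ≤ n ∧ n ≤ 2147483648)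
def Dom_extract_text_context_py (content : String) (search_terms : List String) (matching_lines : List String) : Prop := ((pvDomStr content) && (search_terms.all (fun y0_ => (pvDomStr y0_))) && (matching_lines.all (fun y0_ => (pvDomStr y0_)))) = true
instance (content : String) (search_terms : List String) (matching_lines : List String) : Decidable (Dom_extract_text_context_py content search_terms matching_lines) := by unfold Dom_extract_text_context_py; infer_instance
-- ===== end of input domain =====

-- B replaces A's build-list-then-stable-reverse-sort (lines branch and paragraph fallback)
-- with one pass keeping the first candidate of strictly greatest term count; objective: simpler.

-- ===== PORT A =====
-- sum(1 for term in search_terms if term.lower() in line.lower())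
def pvCntA (search_terms : List String) (line : String) : Int :=
  search_terms.foldl
    (fun acc term => if PySem.Str.isIn (PySem.Str.lower term) (PySem.Str.lower line) then acc + 1 else acc) 0

def extract_text_context_py (content : String) (search_terms : List String) (matching_lines : List String) : String :=
  -- term_counts = [(count, line) for line in matching_lines]
  let term_counts : List (Int × String) :=
    matching_lines.foldl (fun acc line => acc ++ [(pvCntA search_terms line, line)]) []
  -- 'if term_counts: sort; return term_counts[0][1]' — matching on the sorted list is the
  -- same test, since sorted xs = [] ↔ xs = [] (PySem.List.sorted_eq_nil_iff), and [0] never raises here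
  match PySem.List.sorted term_counts (fun x => x.1) true with
  | p :: _ => p.2
  | [] =>
    let paragraphs := (PySem.Str.split? content "\n\n").getD []   -- sep ≠ "", so split? is `some`
    let relevant_paragraphs : List (Int × String) :=
      paragraphs.foldl (fun acc para =>
        if search_terms.any (fun term => PySem.Str.isIn (PySem.Str.lower term) (PySem.Str.lower para)) then
          acc ++ [(pvCntA search_terms para, PySem.Str.strip para)]
        else acc) []
    match PySem.List.sorted relevant_paragraphs (fun x => x.1) true with
    | q :: _ => q.2
    | [] => "No relevant content found"

-- ===== PORT B =====
-- sum(term.lower() in s.lower() for term in search_terms)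
def pvCntB (search_terms : List String) (s : String) : Int :=
  (search_terms.map (fun term => if PySem.Str.isIn (PySem.Str.lower term) (PySem.Str.lower s) then (1 : Int) else 0)).sum

def extract_text_context_py_alt (content : String) (search_terms : List String) (matching_lines : List String) : String :=
  let st := matching_lines.foldl
    (fun b line =>
      let c := pvCntB search_terms line
      if b.2 < c then (some line, c) else b)
    ((none : Option String), (-1 : Int))
  match st.1 with
  | some best => best
  | none =>
    let st2 := ((PySem.Str.split? content "\n\n").getD []).foldl
      (fun b para =>
        let c := pvCntB search_terms para
        if b.2 < c then (some (PySem.Str.strip para), c) else b)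
      ((none : Option String), (0 : Int))
    match st2.1 with
    | some best => best
    | none => "No relevant content found"

-- ===== PRECONDITION & SPEC =====
def Spec_extract_text_context_py (content : String) (search_terms : List String) (matching_lines : List String) (out : String) : Prop := out = extract_text_context_py_alt content search_terms matching_lines
instance (content : String) (search_terms : List String) (matching_lines : List String) (out : String) : Decidable (Spec_extract_text_context_py content search_terms matching_lines out) := by unfold Spec_extract_text_context_py; infer_instance

-- ===== CLAIM (what is proved, stated in full; the proofs are below) =====
def Claim_equal_extract_text_context_py : Prop := ∀ (content : String) (search_terms : List String) (matching_lines : List String), Dom_extract_text_context_py content search_terms matching_lines → Spec_extract_text_context_py content search_terms matching_lines (extract_text_context_py content search_terms matching_lines)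

-- ===== LEMMAS AND PROOFS =====

lemma pvCntB_eq_countP (ts : List String) (s : String) :
    pvCntB ts s = (ts.countP (fun t => PySem.Str.isIn (PySem.Str.lower t) (PySem.Str.lower s)) : Int) := by
  simpa [pvCntB] using
    PySem.List.sum_map_ite_one_zero (fun t => PySem.Str.isIn (PySem.Str.lower t) (PySem.Str.lower s)) ts

lemma pvCntA_eq_pvCntB (ts : List String) (s : String) : pvCntA ts s = pvCntB ts s := by
  rw [pvCntB_eq_countP]
  simpa [pvCntA] using
    PySem.List.foldl_if_add_one (fun t => PySem.Str.isIn (PySem.Str.lower t) (PySem.Str.lower s)) ts 0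

lemma pvCntB_nonneg (ts : List String) (s : String) : 0 ≤ pvCntB ts s := by
  rw [pvCntB_eq_countP]; exact_mod_cast Nat.zero_le _

-- Invariant linking A's insertion-sort accumulator with B's (best, best_count) state:
-- either both are empty/none at the initial level e, or B holds exactly the head of A's accumulator.
def pvInv (e : Int) (acc : List (Int × String)) (s : Option String × Int) : Prop :=
  ((acc = [] ∧ s = (none, e)) ∨ (∃ m t, acc = m :: t ∧ s = (some m.2, m.1))) ∧ (∀ q ∈ acc, e < q.1)

-- One pass of stable descending insertion (insert only when p holds) versus B's strict-max pass.
lemma pvLoop (c : String → Int) (f2 : String → String) (p : String → Bool) (e : Int)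
    (hp : ∀ x, p x = true ↔ e < c x) :
    ∀ (l : List String) (acc : List (Int × String)) (s : Option String × Int),
      pvInv e acc s →
      pvInv e
        (l.foldl (fun a x => if p x then PySem.List.insertBy (fun a b => decide (b.1 < a.1)) (c x, f2 x) a else a) acc)
        (l.foldl (fun b x => if b.2 < c x then (some (f2 x), c x) else b) s) := by
  intro l
  induction l with
  | nil => intro acc s h; exact h
  | cons x l ih =>
    intro acc s h
    simp only [List.foldl_cons]
    apply ih
    obtain ⟨hcase, hmem⟩ := h
    by_cases hpx : p x = true
    · have hec : e < c x := (hp x).mp hpx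
      rcases hcase with ⟨hacc, hs⟩ | ⟨m, t, hacc, hs⟩
      · subst hacc; subst hs
        constructor
        · right
          exact ⟨(c x, f2 x), [], by simp [hpx, PySem.List.insertBy, hec]⟩
        · intro q hq
          simp [hpx, PySem.List.insertBy] at hq
          subst hq; exact hec
      · subst hacc; subst hs
        by_cases hlt : m.1 < c x
        · have hacc' : (if p x = true then PySem.List.insertBy (fun a b => decide (b.1 < a.1)) (c x, f2 x) (m :: t) else m :: t) = (c x, f2 x) :: m :: t := by
            simp [hpx, PySem.List.insertBy, hlt]
          rw [hacc']
          constructor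
          · exact Or.inr ⟨(c x, f2 x), m :: t, rfl, by simp [hlt]⟩
          · intro q hq
            rcases List.mem_cons.mp hq with rfl | hq
            · exact hec
            · exact hmem q hq
        · have hacc' : (if p x = true then PySem.List.insertBy (fun a b => decide (b.1 < a.1)) (c x, f2 x) (m :: t) else m :: t) = m :: PySem.List.insertBy (fun a b => decide (b.1 < a.1)) (c x, f2 x) t := by
            simp [hpx, PySem.List.insertBy, hlt]
          rw [hacc']
          constructor
          · exact Or.inr ⟨m, _, rfl, by simp [hlt]⟩
          · intro q hq
            rcases List.mem_cons.mp hq with rfl | hq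
            · exact hmem q (by simp)
            · rcases (PySem.List.mem_insertBy (before := fun a b => decide (b.1 < a.1)) (x := (c x, f2 x)) (ys := t) (y := q)).mp hq with rfl | hqt
              · exact hec
              · exact hmem q (by simp [hqt])
    · have hnec : ¬ e < c x := fun h => hpx ((hp x).mpr h)
      rcases hcase with ⟨hacc, hs⟩ | ⟨m, t, hacc, hs⟩
      · subst hacc; subst hs
        exact ⟨Or.inl ⟨by simp [hpx], by simp [hnec]⟩, by simp [hpx]⟩
      · subst hacc; subst hs
        have hnlt : ¬ m.1 < c x := fun h => hnec (lt_trans (hmem m (by simp)) h)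
        exact ⟨Or.inr ⟨m, t, by simp [hpx], by simp [hnlt]⟩, by simpa [hpx] using hmem⟩

-- A's sorted accumulator as a fold of insertBy over the raw list (with the membership filter p).
lemma pvSortedA (c : String → Int) (f2 : String → String) (p : String → Bool) (l : List String) :
    PySem.List.sorted
      (l.foldl (fun acc x => if p x then acc ++ [(c x, f2 x)] else acc) ([] : List (Int × String)))
      (fun x => x.1) true
    = l.foldl (fun a x => if p x then PySem.List.insertBy (fun a b => decide (b.1 < a.1)) (c x, f2 x) a else a) [] := by
  rw [PySem.List.foldl_append_if p (fun x => (c x, f2 x)) l []]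
  rw [PySem.List.sorted_rev_eq_foldl_insertBy]
  simp only [List.nil_append]
  rw [List.foldl_map (f := fun x => (c x, f2 x))
      (g := fun a y => PySem.List.insertBy (fun a b => decide (b.1 < a.1)) y a)]
  rw [List.foldl_filter]

-- ===== VERDICT (by name: the statement is the Claim_ definition above) =====
theorem extract_text_context_py_spec : Claim_equal_extract_text_context_py := by
  intro content ts ml _
  unfold Spec_extract_text_context_py extract_text_context_py extract_text_context_py_alt
  simp only []
  -- line phase
  have hp1 : ∀ x : String, (fun (_ : String) => true) x = true ↔ (-1 : Int) < pvCntB ts x := by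
    intro x
    have := pvCntB_nonneg ts x
    simp only [true_iff]
    omega
  have hA1 : (ml.foldl (fun acc line => acc ++ [(pvCntA ts line, line)]) ([] : List (Int × String)))
      = ml.foldl (fun acc x => if (fun (_ : String) => true) x then acc ++ [(pvCntB ts x, (fun y => y) x)] else acc) [] := by
    congr 1
    funext acc line
    simp [pvCntA_eq_pvCntB]
  have hL1 := pvLoop (pvCntB ts) (fun y => y) (fun _ => true) (-1) hp1 ml [] ((none : Option String), -1)
      ⟨Or.inl ⟨rfl, rfl⟩, by simp⟩
  rw [hA1, pvSortedA (pvCntB ts) (fun y => y) (fun _ => true) ml]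
  obtain ⟨hcase1, -⟩ := hL1
  rcases hcase1 with ⟨hacc1, hs1⟩ | ⟨m, t, hacc1, hs1⟩
  · rw [hacc1, hs1]
    -- paragraph phase
    have hp2 : ∀ x : String,
        (ts.any (fun term => PySem.Str.isIn (PySem.Str.lower term) (PySem.Str.lower x))) = true ↔ (0 : Int) < pvCntB ts x := by
      intro x
      rw [pvCntB_eq_countP, List.any_eq_true]
      constructor
      · intro h
        exact_mod_cast List.countP_pos_iff.mpr h
      · intro h
        exact List.countP_pos_iff.mp (by exact_mod_cast h)
    have hA2 : (((PySem.Str.split? content "\n\n").getD []).foldl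
          (fun acc para => if ts.any (fun term => PySem.Str.isIn (PySem.Str.lower term) (PySem.Str.lower para)) then acc ++ [(pvCntA ts para, PySem.Str.strip para)] else acc) ([] : List (Int × String)))
        = ((PySem.Str.split? content "\n\n").getD []).foldl
          (fun acc x => if (fun y => ts.any (fun term => PySem.Str.isIn (PySem.Str.lower term) (PySem.Str.lower y))) x then acc ++ [(pvCntB ts x, PySem.Str.strip x)] else acc) [] := by
      congr 1
      funext acc para
      simp [pvCntA_eq_pvCntB]
    have hL2 := pvLoop (pvCntB ts) PySem.Str.strip
        (fun y => ts.any (fun term => PySem.Str.isIn (PySem.Str.lower term) (PySem.Str.lower y))) 0 hp2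
        ((PySem.Str.split? content "\n\n").getD []) [] ((none : Option String), 0)
        ⟨Or.inl ⟨rfl, rfl⟩, by simp⟩
    rw [hA2, pvSortedA (pvCntB ts) PySem.Str.strip
        (fun y => ts.any (fun term => PySem.Str.isIn (PySem.Str.lower term) (PySem.Str.lower y))) ((PySem.Str.split? content "\n\n").getD [])]
    obtain ⟨hcase2, -⟩ := hL2
    rcases hcase2 with ⟨hacc2, hs2⟩ | ⟨m, t, hacc2, hs2⟩
    · rw [hacc2, hs2]
    · rw [hacc2, hs2]
  · rw [hacc1, hs1]
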